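-- pv_equiv track=rewrite | github.com/sungcheolkim78/code_interview | strings/10_multiply_string.py | sum_results
-- ===== SOURCE A (Python) =====
-- from typing import List
-- from itertools import zip_longest
--
-- def sum_results(results: List[List[int]]) -> List[int]:
--     # initialize answer as a number from results.
--     answer = results.pop()
--
--     # add each result to answer one at a time
--     for result in results:
--         new_answer = []
--         carry = 0
--
--         for digit1, digit2 in zip_longest(result, answer, fillvalue=0):
--             curr_sum = digit1 + digit2 + carry
--             carry = curr_sum // 10
--             new_answer.append(curr_sum % 10)
--
--         if carry != 0:
--             new_answer.append(carry)
--
--         answer = new_answer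
--
--     return answer
-- ===== SOURCE B (Python) =====
-- def to_int(digits):
--     """Value of a little-endian digit list."""
--     value = 0
--     for d in reversed(digits):
--         value = value * 10 + d
--     return value
--
--
-- def add_numbers(a, b):
--     """Add two little-endian digit lists via integer arithmetic.
--
--     Positional addition keeps every column of the wider operand, so the
--     result has max(len(a), len(b)) digits plus a final carry if one occurs.
--     """
--     n = max(len(a), len(b))
--     v = to_int(a) + to_int(b)
--     digits = [v // 10 ** i % 10 for i in range(n)]
--     carry = v // 10 ** n
--     if carry:
--         digits.append(carry)
--     return digits
--
--
-- def sum_results(results):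
--     total = results.pop()
--     for number in results:
--         total = add_numbers(total, number)
--     return total
-- ===== Notes on version B (the rewrite author's own statement) =====
-- stated objective: alternative
-- what changed: Each pairwise addition is done by converting both digit lists to integers, adding, and converting back (keeping every column of the wider operand), instead of A's zip_longest digit-by-digit carry-propagation loop; Pre_ excludes only the empty list, on which pop() raises IndexError in both.
import Mathlib
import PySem

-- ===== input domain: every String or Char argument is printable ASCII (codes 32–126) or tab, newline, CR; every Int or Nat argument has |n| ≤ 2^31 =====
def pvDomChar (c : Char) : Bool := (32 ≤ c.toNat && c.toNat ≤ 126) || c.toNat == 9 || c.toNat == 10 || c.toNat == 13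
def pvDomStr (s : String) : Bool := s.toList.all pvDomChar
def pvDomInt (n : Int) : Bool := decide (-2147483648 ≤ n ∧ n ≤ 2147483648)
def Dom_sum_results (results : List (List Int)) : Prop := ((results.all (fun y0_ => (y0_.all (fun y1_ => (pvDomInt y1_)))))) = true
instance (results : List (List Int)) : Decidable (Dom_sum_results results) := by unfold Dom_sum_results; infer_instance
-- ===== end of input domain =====

-- B adds the numbers pairwise by converting each pair to integers, adding, and
-- converting back, instead of A's digit-by-digit carry-propagation loop
-- (objective: alternative).  Both A and B pop the last element (A mutates
-- `results` in place; B does the same in Source B) and both raise IndexError on an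
-- empty list — the equivalence proved here is about the RETURN value.

-- ===== PORT A =====
-- inner for-loop over zip_longest(result, answer, fillvalue=0); the trailing
-- 'if carry != 0: new_answer.append(carry)' is the base case of the recursion
def addLoop : List Int → List Int → Int → List Int
  | [], [], c => if c ≠ 0 then [c] else []
  | d1 :: r, [], c =>
      PySem.Int.mod (d1 + 0 + c) 10 :: addLoop r [] (PySem.Int.floordiv (d1 + 0 + c) 10)
  | [], d2 :: a, c =>
      PySem.Int.mod (0 + d2 + c) 10 :: addLoop [] a (PySem.Int.floordiv (0 + d2 + c) 10)
  | d1 :: r, d2 :: a, c =>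
      PySem.Int.mod (d1 + d2 + c) 10 :: addLoop r a (PySem.Int.floordiv (d1 + d2 + c) 10)

def sum_results (results : List (List Int)) : List Int :=
  match results.getLast? with
  | none => []   -- results.pop() raises IndexError on []; excluded by Pre_
  | some answer => results.dropLast.foldl (fun ans result => addLoop result ans 0) answer

-- ===== PORT B =====
-- 'value = 0; for d in reversed(digits): value = value * 10 + d'
def to_int (digits : List Int) : Int := digits.reverse.foldl (fun value d => value * 10 + d) 0

-- 'n = max(...); v = ...; digits = [v // 10**i % 10 for i in range(n)];
--  carry = v // 10**n; if carry: digits.append(carry)'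
def add_numbers (a b : List Int) : List Int :=
  let n := max a.length b.length
  let v := to_int a + to_int b
  let digits := (List.range n).map (fun i => PySem.Int.mod (PySem.Int.floordiv v (10 ^ i)) 10)
  let carry := PySem.Int.floordiv v (10 ^ n)
  if carry ≠ 0 then digits ++ [carry] else digits

def sum_results_alt (results : List (List Int)) : List Int :=
  match results.getLast? with
  | none => []   -- results.pop() raises IndexError on []; excluded by Pre_
  | some total => results.dropLast.foldl (fun total number => add_numbers total number) total

-- ===== PRECONDITION & SPEC =====
-- Pre_ excludes exactly the empty list, on which A (and B) raise IndexError from pop()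
def Pre_sum_results (results : List (List Int)) : Prop := results ≠ []
instance (results : List (List Int)) : Decidable (Pre_sum_results results) := by
  unfold Pre_sum_results; infer_instance

def pvWitness_sum_results : List (List Int) := [[1, 2], [9, 9], [5]]

def Spec_sum_results (results : List (List Int)) (out : List Int) : Prop := out = sum_results_alt results
instance (results : List (List Int)) (out : List Int) : Decidable (Spec_sum_results results out) := by unfold Spec_sum_results; infer_instance

-- ===== CLAIM (what is proved, stated in full; the proofs are below) =====
def Claim_equal_sum_results : Prop := ∀ (results : List (List Int)), Dom_sum_results results → Pre_sum_results results → Spec_sum_results results (sum_results results)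

-- ===== LEMMAS AND PROOFS =====

-- value of a little-endian digit list (foldr form, convenient for induction)
def val (xs : List Int) : Int := xs.foldr (fun d a => d + 10 * a) 0

theorem to_int_eq_val (xs : List Int) : to_int xs = val xs := by
  unfold to_int
  rw [List.foldl_reverse]
  induction xs with
  | nil => rfl
  | cons d xs ih =>
      simp only [List.foldr_cons]
      rw [ih]
      simp only [val, List.foldr_cons]
      ring

-- canonical emission of m digits of V plus a trailing carry; the bridge between
-- A's carry loop and B's range comprehension
def emit : Int → Nat → List Int
  | V, 0 => if V ≠ 0 then [V] else []
  | V, m + 1 => PySem.Int.mod V 10 :: emit (PySem.Int.floordiv V 10) m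

theorem floordiv_collapse (V : Int) (m : Nat) :
    PySem.Int.floordiv (PySem.Int.floordiv V 10) (10 ^ m)
      = PySem.Int.floordiv V (10 ^ (m + 1)) := by
  rw [PySem.Int.floordiv_eq_ediv_of_pos (b := 10) (by norm_num),
    PySem.Int.floordiv_eq_ediv_of_pos (by positivity),
    PySem.Int.floordiv_eq_ediv_of_pos (by positivity),
    Int.ediv_ediv_of_nonneg (by norm_num)]
  congr 1
  ring

-- emit is exactly B's comprehension followed by the carry append
theorem emit_eq_range : ∀ (m : Nat) (V : Int),
    emit V m = (List.range m).map (fun i => PySem.Int.mod (PySem.Int.floordiv V (10 ^ i)) 10)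
      ++ (if PySem.Int.floordiv V (10 ^ m) ≠ 0 then [PySem.Int.floordiv V (10 ^ m)] else []) := by
  intro m
  induction m with
  | zero =>
      intro V
      simp only [emit, List.range_zero, List.map_nil, List.nil_append, pow_zero]
      rw [PySem.Int.floordiv_eq_ediv_of_pos (by norm_num), Int.ediv_one]
  | succ m ih =>
      intro V
      simp only [emit, List.range_succ_eq_map, List.map_cons, List.map_map]
      rw [ih (PySem.Int.floordiv V 10)]
      simp only [pow_zero]
      rw [PySem.Int.floordiv_eq_ediv_of_pos (a := V) (b := 1) (by norm_num), Int.ediv_one,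
        floordiv_collapse]
      refine List.cons_eq_cons.mpr ⟨rfl, ?_⟩
      congr 1
      apply List.map_congr_left
      intro i _
      simp only [Function.comp]
      rw [floordiv_collapse]

-- A's inner loop computes emit at the value of the digit-wise sum
theorem addLoop_emit : ∀ (r a : List Int) (c : Int),
    addLoop r a c = emit (val r + val a + c) (max r.length a.length) := by
  have hmd : ∀ x : Int, PySem.Int.mod x 10 = x % 10 :=
    fun x => PySem.Int.mod_eq_emod_of_pos (by norm_num)
  have hfd : ∀ x : Int, PySem.Int.floordiv x 10 = x / 10 :=
    fun x => PySem.Int.floordiv_eq_ediv_of_pos (by norm_num)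
  intro r
  induction r with
  | nil =>
    intro a
    induction a with
    | nil =>
      intro c
      simp only [addLoop, val, List.foldr_nil, List.length_nil, Nat.max_self, emit]
      norm_num
    | cons e a iha =>
      intro c
      simp only [addLoop]
      rw [show max (List.length ([] : List Int)) ((e :: a).length)
            = max (List.length ([] : List Int)) a.length + 1 by simp]
      simp only [emit]
      rw [iha (PySem.Int.floordiv (0 + e + c) 10)]
      refine List.cons_eq_cons.mpr ⟨?_, ?_⟩
      · simp only [val, List.foldr_cons, List.foldr_nil, hmd]
        omega
      · congr 1
        simp only [val, List.foldr_cons, List.foldr_nil, hfd]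
        omega
  | cons d r ihr =>
    intro a
    cases a with
    | nil =>
      intro c
      simp only [addLoop]
      rw [show max ((d :: r).length) (List.length ([] : List Int))
            = max r.length (List.length ([] : List Int)) + 1 by simp]
      simp only [emit]
      rw [ihr [] (PySem.Int.floordiv (d + 0 + c) 10)]
      refine List.cons_eq_cons.mpr ⟨?_, ?_⟩
      · simp only [val, List.foldr_cons, List.foldr_nil, hmd]
        omega
      · congr 1
        simp only [val, List.foldr_cons, List.foldr_nil, hfd]
        omega
    | cons e a =>
      intro c
      simp only [addLoop]
      rw [show max ((d :: r).length) ((e :: a).length)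
            = max r.length a.length + 1 by simp [Nat.succ_max_succ]]
      simp only [emit]
      rw [ihr a (PySem.Int.floordiv (d + e + c) 10)]
      refine List.cons_eq_cons.mpr ⟨?_, ?_⟩
      · simp only [val, List.foldr_cons, hmd]
        omega
      · congr 1
        simp only [val, List.foldr_cons, hfd]
        omega

-- the two step functions agree pointwise
theorem step_eq (ans r : List Int) : addLoop r ans 0 = add_numbers ans r := by
  rw [addLoop_emit]
  unfold add_numbers
  simp only [to_int_eq_val]
  rw [emit_eq_range]
  rw [show val r + val ans + 0 = val ans + val r by ring, Nat.max_comm]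
  split_ifs <;> simp

-- ===== VERDICT (by name: the statement is the Claim_ definition above) =====
theorem sum_results_spec : Claim_equal_sum_results := by
  unfold Claim_equal_sum_results
  intro results _ _
  unfold Spec_sum_results sum_results sum_results_alt
  cases h : results.getLast? with
  | none => rfl
  | some answer =>
      simp only
      congr 1
      funext ans r
      exact step_eq ans r
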